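-- pv_equiv track=rewrite | github.com/zhudoris475-gif/hwp-proofread-system | hwp_proofread/analysis/noise_filter.py | filter_noise_text
-- ===== SOURCE A (Python) =====
-- def filter_noise_text(text, noise_chars):
--     result = []
--     for ch in text:
--         if ch in noise_chars:
--             result.append(' ')
--         else:
--             result.append(ch)
--     return ''.join(result)
-- ===== SOURCE B (Python) =====
-- def filter_noise_text(text, noise_chars):
--     for c in set(noise_chars):
--         text = text.replace(c, ' ')
--     return text
-- ===== Notes on version B (the rewrite author's own statement) =====
-- stated objective: alternative
-- what changed: Instead of streaming over the text with a per-character membership branch and appending to a result list, B iterates over the distinct noise characters and performs one whole-string str.replace pass per noise character; since every replacement target is a space, pass order is irrelevant.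
import Mathlib
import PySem

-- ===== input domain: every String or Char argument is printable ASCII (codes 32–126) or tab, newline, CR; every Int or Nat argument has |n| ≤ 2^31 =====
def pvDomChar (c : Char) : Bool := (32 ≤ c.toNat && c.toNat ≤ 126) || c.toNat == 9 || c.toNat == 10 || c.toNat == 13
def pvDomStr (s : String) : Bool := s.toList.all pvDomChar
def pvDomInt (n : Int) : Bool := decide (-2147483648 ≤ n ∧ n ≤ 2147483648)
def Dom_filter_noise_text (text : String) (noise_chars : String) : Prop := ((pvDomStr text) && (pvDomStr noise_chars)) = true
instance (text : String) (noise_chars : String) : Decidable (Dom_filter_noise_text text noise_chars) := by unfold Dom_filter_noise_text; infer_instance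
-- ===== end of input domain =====

-- B replaces A's per-character membership-branch stream over the text by staged whole-string
-- replace passes, one per distinct noise character (alternative decomposition; similar cost).


-- ===== PORT A =====
def filter_noise_text (text : String) (noise_chars : String) : String :=
  String.ofList (text.toList.foldl
    (fun result ch => if noise_chars.toList.contains ch then result ++ [' '] else result ++ [ch]) [])

-- ===== PORT B =====
-- B: for c in set(noise_chars): text = text.replace(c, ' ').  set(noise_chars) is
-- PySem.Set.ofList (the result is order-independent, proved below), replace is PySem.Str.replace.
def filter_noise_text_alt (text : String) (noise_chars : String) : String :=
  (PySem.Set.ofList noise_chars.toList).foldl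
    (fun t c => PySem.Str.replace t (String.ofList [c]) " ") text

-- ===== PRECONDITION & SPEC =====
def Spec_filter_noise_text (text : String) (noise_chars : String) (out : String) : Prop := out = filter_noise_text_alt text noise_chars
instance (text : String) (noise_chars : String) (out : String) : Decidable (Spec_filter_noise_text text noise_chars out) := by unfold Spec_filter_noise_text; infer_instance

-- ===== CLAIM (what is proved, stated in full; the proofs are below) =====
def Claim_equal_filter_noise_text : Prop := ∀ (text : String) (noise_chars : String), Dom_filter_noise_text text noise_chars → Spec_filter_noise_text text noise_chars (filter_noise_text text noise_chars)

-- ===== LEMMAS AND PROOFS =====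

-- Chars.replace.go with a single-char pattern maps that char to `r` pointwise.
lemma go_single (c r : Char) : ∀ (l : List Char) (fuel : Nat) (acc : List Char),
    l.length ≤ fuel →
    PySem.Chars.replace.go [c] [r] fuel l acc
      = acc.reverse ++ l.map (fun ch => if ch = c then r else ch) := by
  intro l
  induction l with
  | nil =>
      intro fuel acc _
      cases fuel <;> simp [PySem.Chars.replace.go]
  | cons d t ih =>
      intro fuel acc h
      cases fuel with
      | zero => simp at h
      | succ fuel =>
          by_cases hd : d = c
          · rw [PySem.Chars.replace.go]
            simp only [hd, List.isPrefixOf, BEq.rfl, Bool.true_and, if_pos]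
            rw [show List.drop [c].length (c :: t) = t from rfl,
              ih fuel _ (by simpa using h)]
            simp
          · rw [PySem.Chars.replace.go]
            have : [c].isPrefixOf (d :: t) = false := by
              simp [List.isPrefixOf]; exact fun hcd => (hd hcd.symm).elim
            rw [this]
            simp only [Bool.false_eq_true, if_false]
            rw [ih fuel _ (by simpa using h)]
            simp [hd]

-- str.replace with a one-character pattern is a charwise map.
lemma replace_single (s : List Char) (c r : Char) :
    PySem.Chars.replace s [c] [r] = s.map (fun ch => if ch = c then r else ch) := by
  rw [PySem.Chars.replace]
  simp only [List.isEmpty_cons, Bool.false_eq_true, if_false]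
  rw [go_single c r s s.length [] le_rfl]
  simp

-- staged charwise-map passes over the noise list collapse to one membership map
lemma staged_map (l : List Char) : ∀ (s : List Char),
    l.foldl (fun t c => t.map (fun ch => if ch = c then ' ' else ch)) s
      = s.map (fun ch => if ch ∈ l then ' ' else ch) := by
  induction l with
  | nil => intro s; simp
  | cons c t ih =>
      intro s
      rw [List.foldl_cons, ih, List.map_map]
      apply List.map_congr_left
      intro ch _
      by_cases h : ch = c <;> simp [h, Function.comp]

-- B's String-level fold, expressed as that charwise map
lemma alt_fold_eq (l : List Char) : ∀ (s : String),
    l.foldl (fun t c => PySem.Str.replace t (String.ofList [c]) " ") s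
      = String.ofList (s.toList.map (fun ch => if ch ∈ l then ' ' else ch)) := by
  induction l with
  | nil => intro s; simp
  | cons c t ih =>
      intro s
      rw [List.foldl_cons, ih]
      unfold PySem.Str.replace
      simp only [String.toList_ofList]
      rw [show (" " : String).toList = [' '] from rfl, replace_single]
      rw [List.map_map]
      have := staged_map t (s.toList.map (fun ch => if ch = c then ' ' else ch))
      rw [List.map_map] at this
      congr 1
      calc (s.toList.map ((fun ch => if ch ∈ t then ' ' else ch) ∘ fun ch => if ch = c then ' ' else ch))
          = s.toList.map (fun ch => if ch ∈ c :: t then ' ' else ch) := by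
            apply List.map_congr_left
            intro ch _
            by_cases h : ch = c <;> simp [h, Function.comp]

-- A's accumulator loop is the same membership map
lemma foldl_branch_eq_map (noise : List Char) (l : List Char) (acc : List Char) :
    l.foldl (fun result ch => if noise.contains ch then result ++ [' '] else result ++ [ch]) acc
      = acc ++ l.map (fun ch => if ch ∈ noise then ' ' else ch) := by
  induction l generalizing acc with
  | nil => simp
  | cons c t ih =>
      rw [List.foldl_cons]
      by_cases h : c ∈ noise
      · rw [if_pos (by simpa using h), ih]; simp [h]
      · rw [if_neg (by simpa using h), ih]; simp [h]

-- ===== VERDICT (by name: the statement is the Claim_ definition above) =====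
theorem filter_noise_text_spec : Claim_equal_filter_noise_text := by
  intro text noise_chars _
  unfold Spec_filter_noise_text filter_noise_text filter_noise_text_alt
  rw [foldl_branch_eq_map, alt_fold_eq]
  simp only [List.nil_append]
  congr 1
  apply List.map_congr_left
  intro ch _
  simp [PySem.Set.mem_ofList]
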